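-- pv_equiv track=rewrite | github.com/paulfchristiano/interpreter | crutch.py | parenthesize_top_level
-- ===== SOURCE A (Python) =====
-- def escape_braces(s):
--     """
--     escape_braces(s).format() = s
--
--     Replace { with {{ and replace } with }}
--     """
--
--     def escape_char(c):
--         if c == '{':
--             return '{{'
--         if c == '}':
--             return '}}'
--         return c
--     return ''.join(escape_char(c) for c in s)
--
-- def parenthesize_top_level(expr):
--     """
--     Replace each parenthesized expression with {}, and returns a list of parenthesized expressions
--     """
--     expr = escape_braces(expr)
--     paren_count = 0
--     template = ""
--     current_arg = ""
--     arg_list = []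
--     for c in expr:
--         if c == '(':
--             if paren_count > 0:
--                 current_arg += c
--             paren_count += 1
--         elif c == ')':
--             paren_count -= 1
--             if paren_count > 0:
--                 current_arg += c
--             elif paren_count == 0:
--                 arg_list.append(current_arg.format())
--                 current_arg = ""
--                 template += "({})"
--             elif paren_count < 0:
--                 return expr, []
--         else:
--             if paren_count > 0:
--                 current_arg += c
--             elif paren_count == 0:
--                 template += c
--     if paren_count == 0:
--         return template, arg_list
--     else:
--         return expr, []
-- ===== SOURCE B (Python) =====
-- def _escaped(s):
--     return ''.join('{{' if c == '{' else '}}' if c == '}' else c for c in s)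
--
-- def parenthesize_top_level(expr):
--     """
--     Outer index loop over top-level text; a nested scanner finds each
--     matching close paren and the raw inner text is collected directly,
--     so there is no escape/format round-trip on the arguments.
--     """
--     chars = list(expr)
--     n = len(chars)
--     template = []
--     args = []
--     i = 0
--     while i < n:
--         c = chars[i]
--         if c == ')':
--             return _escaped(expr), []
--         if c == '(':
--             inner = []
--             depth = 0
--             i += 1
--             matched = False
--             while i < n:
--                 d = chars[i]
--                 i += 1
--                 if d == '(':
--                     depth += 1
--                 elif d == ')':
--                     if depth == 0:
--                         matched = True
--                         break
--                     depth -= 1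
--                 inner.append(d)
--             if not matched:
--                 return _escaped(expr), []
--             args.append(''.join(inner))
--             template.append('({})')
--         else:
--             template.append('{{' if c == '{' else '}}' if c == '}' else c)
--             i += 1
--     return ''.join(template), args
-- ===== Notes on version B (the rewrite author's own statement) =====
-- stated objective: alternative
-- what changed: A pre-escapes the whole string and runs one flat depth-counter state machine whose argument accumulator is escaped and then un-escaped via str.format; B keeps the original string, uses an outer loop over top-level text with a nested matching-paren scanner per group, and collects raw argument text directly, with no escape/format round-trip.
import Mathlib
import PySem

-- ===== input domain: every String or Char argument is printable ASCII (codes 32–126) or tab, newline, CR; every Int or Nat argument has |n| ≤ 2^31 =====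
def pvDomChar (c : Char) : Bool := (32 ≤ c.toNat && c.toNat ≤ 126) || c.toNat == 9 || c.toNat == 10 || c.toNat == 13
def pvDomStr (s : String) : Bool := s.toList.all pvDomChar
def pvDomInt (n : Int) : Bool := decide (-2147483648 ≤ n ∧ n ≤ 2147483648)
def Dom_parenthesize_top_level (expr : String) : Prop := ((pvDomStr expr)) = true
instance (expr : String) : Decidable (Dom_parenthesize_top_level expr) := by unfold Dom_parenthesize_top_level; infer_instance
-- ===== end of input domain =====

-- B replaces A's pre-escape + flat state machine + escape/format round-trip by an outer
-- loop with a nested matching-paren scanner over the raw text (objective: alternative).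

-- escape_braces, per character (shared by both sources: A calls escape_braces, B calls _escaped)
def escC (c : Char) : List Char :=
  if c = '{' then ['{', '{'] else if c = '}' then ['}', '}'] else [c]

def escL : List Char → List Char
  | [] => []
  | c :: t => escC c ++ escL t

-- ===== PORT A =====
-- current_arg.format(): A only ever formats strings whose braces are all doubled
-- (escape_braces output split at paren boundaries), and there .format() exactly
-- un-doubles the braces; this port is exact on that domain.
def fmtL : List Char → List Char
  | [] => []
  | c :: t =>
    if c = '{' ∨ c = '}' then c :: fmtL (t.drop 1)
    else c :: fmtL t
  termination_by l => l.length
  decreasing_by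
  · simp only [List.length_cons, List.length_drop]; omega
  · simp

-- A's single for-loop over the escaped string; `none` = the early/late
-- `return expr, []` (unbalanced parens)
def aGo : List Char → Int → List Char → List Char → List String → Option (List Char × List String)
  | [], pc, tmpl, _cur, args => if pc = 0 then some (tmpl, args) else none
  | c :: rest, pc, tmpl, cur, args =>
    if c = '(' then
      aGo rest (pc + 1) tmpl (if pc > 0 then cur ++ [c] else cur) args
    else if c = ')' then
      let pc' := pc - 1
      if pc' > 0 then aGo rest pc' tmpl (cur ++ [c]) args
      else if pc' = 0 then aGo rest pc' (tmpl ++ ['(', '{', '}', ')']) [] (args ++ [String.mk (fmtL cur)])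
      else none
    else
      if pc > 0 then aGo rest pc tmpl (cur ++ [c]) args
      else aGo rest pc (tmpl ++ [c]) cur args

def parenthesize_top_level (expr : String) : String × List String :=
  let e := escL expr.toList
  match aGo e 0 [] [] [] with
  | some (tmpl, args) => (String.mk tmpl, args)
  | none => (String.mk e, [])

-- ===== PORT B =====
-- the nested while loop: scan for the matching ')' at relative depth d,
-- returning (raw inner chars, rest after the matching ')'); none = ran off the end
def mp : List Char → Int → Option (List Char × List Char)
  | [], _ => none
  | c :: t, d =>
    if c = '(' then (mp t (d + 1)).map (fun p => (c :: p.1, p.2))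
    else if c = ')' then
      if d = 0 then some ([], t)
      else (mp t (d - 1)).map (fun p => (c :: p.1, p.2))
    else (mp t d).map (fun p => (c :: p.1, p.2))

theorem mp_len : ∀ (l : List Char) (d : Int) (p : List Char × List Char),
    mp l d = some p → p.2.length < l.length := by
  intro l
  induction l with
  | nil => intro d p h; simp [mp] at h
  | cons c t ih =>
    intro d p h
    simp only [mp] at h
    split_ifs at h with h1 h2 h3
    · obtain ⟨⟨i, r⟩, hq, rfl⟩ := Option.map_eq_some_iff.mp h
      have := ih _ _ hq; simp at this ⊢; omega
    · cases h; simp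
    · obtain ⟨⟨i, r⟩, hq, rfl⟩ := Option.map_eq_some_iff.mp h
      have := ih _ _ hq; simp at this ⊢; omega
    · obtain ⟨⟨i, r⟩, hq, rfl⟩ := Option.map_eq_some_iff.mp h
      have := ih _ _ hq; simp at this ⊢; omega

-- B's outer while loop over top-level text
def bGo : List Char → Option (List Char × List String)
  | [] => some ([], [])
  | c :: t =>
    if c = ')' then none
    else if c = '(' then
      match h : mp t 0 with
      | none => none
      | some (inner, rest) =>
        (bGo rest).map (fun p => (['(', '{', '}', ')'] ++ p.1, String.mk inner :: p.2))
    else (bGo t).map (fun p => (escC c ++ p.1, p.2))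
  termination_by l => l.length
  decreasing_by
  · have := mp_len t 0 _ h; simp at this ⊢; omega
  · simp

def parenthesize_top_level_alt (expr : String) : String × List String :=
  match bGo expr.toList with
  | some (tmpl, args) => (String.mk tmpl, args)
  | none => (String.mk (escL expr.toList), [])

-- ===== PRECONDITION & SPEC =====
def Spec_parenthesize_top_level (expr : String) (out : String × List String) : Prop := out = parenthesize_top_level_alt expr
instance (expr : String) (out : String × List String) : Decidable (Spec_parenthesize_top_level expr out) := by unfold Spec_parenthesize_top_level; infer_instance

-- ===== CLAIM (what is proved, stated in full; the proofs are below) =====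
def Claim_equal_parenthesize_top_level : Prop := ∀ (expr : String), Dom_parenthesize_top_level expr → Spec_parenthesize_top_level expr (parenthesize_top_level expr)

-- ===== LEMMAS AND PROOFS =====

theorem fmt_escL : ∀ (l : List Char), fmtL (escL l) = l := by
  intro l
  induction l with
  | nil => simp [escL, fmtL]
  | cons c t ih =>
    by_cases h1 : c = '{'
    · subst h1; simp [escL, escC, fmtL, ih]
    · by_cases h2 : c = '}'
      · subst h2; simp [escL, escC, fmtL, ih]
      · simp [escL, escC, h1, h2, fmtL, ih]

-- inside a parenthesized group: A's loop at paren_count = d+1 over escaped text agrees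
-- with B's matching-paren scan at relative depth d
theorem aGo_inner : ∀ (l : List Char) (d : Nat) (tmpl cur : List Char) (args : List String),
    aGo (escL l) ((d : Int) + 1) tmpl cur args =
      match mp l (d : Int) with
      | none => none
      | some (inner, rest) =>
          aGo (escL rest) 0 (tmpl ++ ['(', '{', '}', ')']) []
            (args ++ [String.mk (fmtL (cur ++ escL inner))]) := by
  intro l
  induction l with
  | nil =>
    intro d tmpl cur args
    simp [escL, mp, aGo]
    omega
  | cons c t ih =>
    intro d tmpl cur args
    by_cases h1 : c = '('
    · subst h1
      have e1 : escL ('(' :: t) = '(' :: escL t := by simp [escL, escC]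
      rw [e1]
      have step : aGo ('(' :: escL t) ((d : Int) + 1) tmpl cur args
          = aGo (escL t) ((d : Int) + 1 + 1) tmpl (cur ++ ['(']) args := by
        simp [aGo]
        try intro h
        try omega
      rw [step]
      have : ((d : Int) + 1 + 1) = (((d + 1 : Nat) : Int) + 1) := by push_cast; ring
      rw [this, ih (d + 1)]
      have em : mp ('(' :: t) (d : Int) = (mp t ((d : Int) + 1)).map (fun p => ('(' :: p.1, p.2)) := by
        simp [mp]
      rw [em]
      push_cast
      cases hm : mp t ((d : Int) + 1) with
      | none => simp
      | some p =>
        cases p with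
        | mk inner rest =>
          simp [escL, escC]
    · by_cases h2 : c = ')'
      · subst h2
        have e1 : escL (')' :: t) = ')' :: escL t := by simp [escL, escC]
        rw [e1]
        by_cases hd : d = 0
        · subst hd
          simp only [Nat.cast_zero]
          have step : aGo (')' :: escL t) ((0 : Int) + 1) tmpl cur args
              = aGo (escL t) 0 (tmpl ++ ['(', '{', '}', ')']) [] (args ++ [String.mk (fmtL cur)]) := by
            simp [aGo]
          rw [step]
          simp [mp, escL]
        · obtain ⟨k, rfl⟩ : ∃ k, d = k + 1 := ⟨d - 1, by omega⟩
          have step : aGo (')' :: escL t) (((k + 1 : Nat) : Int) + 1) tmpl cur args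
              = aGo (escL t) ((k : Int) + 1) tmpl (cur ++ [')']) args := by
            simp [aGo]
          rw [step, ih k]
          have em : mp (')' :: t) ((k + 1 : Nat) : Int)
              = (mp t ((k : Int))).map (fun p => (')' :: p.1, p.2)) := by
            simp [mp]
            omega
          rw [em]
          cases hm : mp t ((k : Int)) with
          | none => simp
          | some p =>
            cases p with
            | mk inner rest => simp [escL, escC]
      · -- ordinary character: escC c is one char (or a doubled brace), appended to cur
        have em : mp (c :: t) (d : Int) = (mp t (d : Int)).map (fun p => (c :: p.1, p.2)) := by
          simp [mp, h1, h2]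
        rw [em]
        have step : aGo (escC c ++ escL t) ((d : Int) + 1) tmpl cur args
            = aGo (escL t) ((d : Int) + 1) tmpl (cur ++ escC c) args := by
          by_cases hb : c = '{'
          · subst hb; simp [escC, aGo]; try omega
          · by_cases hb2 : c = '}'
            · subst hb2; simp [escC, aGo]; try omega
            · simp [escC, hb, hb2, aGo, h1, h2]
              try omega
        have e1 : escL (c :: t) = escC c ++ escL t := by simp [escL]
        rw [e1, step, ih d]
        cases hm : mp t (d : Int) with
        | none => simp
        | some p =>
          cases p with
          | mk inner rest =>
            simp [escL, List.append_assoc]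

-- top level: A's loop at paren_count = 0 agrees with B's outer loop
theorem aGo_top : ∀ (n : Nat) (l : List Char), l.length ≤ n → ∀ (tmpl : List Char) (args : List String),
    aGo (escL l) 0 tmpl [] args =
      match bGo l with
      | none => none
      | some (tm, as) => some (tmpl ++ tm, args ++ as) := by
  intro n
  induction n with
  | zero =>
    intro l hl tmpl args
    have : l = [] := by cases l <;> simp_all
    subst this
    simp [escL, aGo, bGo]
  | succ n ih =>
    intro l hl tmpl args
    cases l with
    | nil => simp [escL, aGo, bGo]
    | cons c t =>
      by_cases h1 : c = '('
      · subst h1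
        have e1 : escL ('(' :: t) = '(' :: escL t := by simp [escL, escC]
        rw [e1]
        have step : aGo ('(' :: escL t) 0 tmpl [] args
            = aGo (escL t) 1 tmpl [] args := by simp [aGo]
        rw [step]
        have h0 : ((0 : Nat) : Int) + 1 = 1 := by norm_num
        rw [← h0, aGo_inner t 0 tmpl [] args]
        simp only [Nat.cast_zero]
        rw [show bGo ('(' :: t) = (if ('(' : Char) = ')' then none
            else match h : mp t 0 with
              | none => none
              | some (inner, rest) =>
                (bGo rest).map (fun p => (['(', '{', '}', ')'] ++ p.1, String.mk inner :: p.2))) from by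
          rw [bGo]; simp]
        simp only [if_neg (by decide : ¬ ('(' : Char) = ')')]
        cases hm : mp t 0 with
        | none => simp
        | some p =>
          cases p with
          | mk inner rest =>
            simp only [List.nil_append, fmt_escL]
            have hrest : rest.length ≤ n := by
              have := mp_len t 0 (inner, rest) hm
              simp at this hl; omega
            rw [ih rest hrest]
            cases hb : bGo rest with
            | none => simp
            | some q => cases q with | mk tm as => simp
      · by_cases h2 : c = ')'
        · subst h2
          have e1 : escL (')' :: t) = ')' :: escL t := by simp [escL, escC]
          rw [e1]
          have : aGo (')' :: escL t) 0 tmpl [] args = none := by simp [aGo]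
          rw [this]
          rw [show bGo (')' :: t) = none from by rw [bGo]; simp]
        · have e1 : escL (c :: t) = escC c ++ escL t := by simp [escL]
          rw [e1]
          have step : aGo (escC c ++ escL t) 0 tmpl [] args
              = aGo (escL t) 0 (tmpl ++ escC c) [] args := by
            by_cases hb : c = '{'
            · subst hb; simp [escC, aGo]
            · by_cases hb2 : c = '}'
              · subst hb2; simp [escC, aGo]
              · simp [escC, hb, hb2, aGo, h1, h2]
          rw [step]
          have ht : t.length ≤ n := by simp at hl; omega
          rw [ih t ht]
          rw [show bGo (c :: t) = (bGo t).map (fun p => (escC c ++ p.1, p.2)) from by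
            rw [bGo]; simp [h1, h2]]
          cases hb : bGo t with
          | none => simp
          | some q => cases q with | mk tm as => simp

-- ===== VERDICT (by name: the statement is the Claim_ definition above) =====
theorem parenthesize_top_level_spec : Claim_equal_parenthesize_top_level := by
  intro expr _
  unfold Spec_parenthesize_top_level parenthesize_top_level parenthesize_top_level_alt
  simp only [aGo_top expr.toList.length expr.toList le_rfl [] []]
  cases hb : bGo expr.toList with
  | none => simp
  | some p => cases p with | mk tm as => simp
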